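-- pv_equiv track=rewrite | github.com/ramyarangan/pre-mRNA_SecStruct | src/util/aln_util.py | get_introns
-- ===== SOURCE A (Python) =====
-- def find(s, ch):
--     return [i for i, ltr in enumerate(s) if ltr == ch]
--
-- def get_introns(annotation_str):
-- 	five_poses = find(annotation_str, '5')
-- 	bp_poses = find(annotation_str, 'B')
-- 	three_poses = find(annotation_str, '3')
--
-- 	intron_list = []
-- 	if (len(five_poses) == len(bp_poses)) and \
-- 		(len(five_poses) == len(three_poses)):
-- 		for ii in range(len(five_poses)):
-- 			intron_list += \
-- 				[(five_poses[ii]-2, bp_poses[ii]+3, three_poses[ii]+1)]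
-- 	return intron_list
-- ===== SOURCE B (Python) =====
-- def get_introns(annotation_str):
--     # One table of partially-filled rows [five, bp, three], filled in place:
--     # the k-th occurrence of a marker goes into row k's slot for that marker.
--     rows = []
--     c5 = cb = c3 = 0
--     for i, ch in enumerate(annotation_str):
--         if ch == '5':
--             if c5 == len(rows):
--                 rows.append([None, None, None])
--             rows[c5][0] = i
--             c5 += 1
--         elif ch == 'B':
--             if cb == len(rows):
--                 rows.append([None, None, None])
--             rows[cb][1] = i
--             cb += 1
--         elif ch == '3':
--             if c3 == len(rows):
--                 rows.append([None, None, None])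
--             rows[c3][2] = i
--             c3 += 1
--     if any(x is None for row in rows for x in row):
--         return []
--     return [(f - 2, b + 3, t + 1) for f, b, t in rows]
-- ===== Notes on version B (the rewrite author's own statement) =====
-- stated objective: faster
-- what changed: B replaces A's three separate find-scans plus an index loop over parallel position lists with one pass that fills a single table of partial triples in place (the k-th occurrence of a marker lands in row k's slot), then checks the table for unfilled slots instead of comparing list lengths.
import Mathlib
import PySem

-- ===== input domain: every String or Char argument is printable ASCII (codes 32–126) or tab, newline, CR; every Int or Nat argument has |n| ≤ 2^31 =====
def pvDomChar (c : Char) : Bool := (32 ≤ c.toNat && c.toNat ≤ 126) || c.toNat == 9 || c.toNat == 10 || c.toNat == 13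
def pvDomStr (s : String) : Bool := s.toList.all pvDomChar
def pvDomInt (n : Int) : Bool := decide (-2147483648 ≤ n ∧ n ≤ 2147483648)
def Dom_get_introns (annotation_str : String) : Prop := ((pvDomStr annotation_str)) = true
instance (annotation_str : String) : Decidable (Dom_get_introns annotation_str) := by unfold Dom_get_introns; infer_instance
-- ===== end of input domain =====

-- B replaces A's three find-scans plus parallel index lists with one pass filling a single
-- table of partial triples in place, then checks that table for unfilled slots (alternative
-- decomposition, same O(n) cost).

-- ===== PORT A =====
-- def find(s, ch): return [i for i, ltr in enumerate(s) if ltr == ch]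
def pyFind (s : String) (ch : Char) : List Int :=
  (PySem.List.enumerate s.toList).foldl
    (fun acc p => if p.2 = ch then acc ++ [p.1] else acc) []

def get_introns (annotation_str : String) : List (Int × Int × Int) :=
  let five_poses := pyFind annotation_str '5'
  let bp_poses := pyFind annotation_str 'B'
  let three_poses := pyFind annotation_str '3'
  if five_poses.length = bp_poses.length ∧ five_poses.length = three_poses.length then
    (List.range five_poses.length).foldl
      (fun acc ii =>
        acc ++ [(five_poses.getD ii 0 - 2, bp_poses.getD ii 0 + 3, three_poses.getD ii 0 + 1)]) []
  else []

-- ===== PORT B =====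
-- state: (rows table of partial triples, c5, cb, c3)
def gi_step (st : List (Option Int × Option Int × Option Int) × Nat × Nat × Nat)
    (p : Int × Char) : List (Option Int × Option Int × Option Int) × Nat × Nat × Nat :=
  if p.2 = '5' then
    let rows := if st.2.1 = st.1.length then st.1 ++ [(none, none, none)] else st.1
    (rows.modify st.2.1 (fun r => (some p.1, r.2.1, r.2.2)), st.2.1 + 1, st.2.2.1, st.2.2.2)
  else if p.2 = 'B' then
    let rows := if st.2.2.1 = st.1.length then st.1 ++ [(none, none, none)] else st.1
    (rows.modify st.2.2.1 (fun r => (r.1, some p.1, r.2.2)), st.2.1, st.2.2.1 + 1, st.2.2.2)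
  else if p.2 = '3' then
    let rows := if st.2.2.2 = st.1.length then st.1 ++ [(none, none, none)] else st.1
    (rows.modify st.2.2.2 (fun r => (r.1, r.2.1, some p.1)), st.2.1, st.2.2.1, st.2.2.2 + 1)
  else st

def get_introns_alt (annotation_str : String) : List (Int × Int × Int) :=
  let st := (PySem.List.enumerate annotation_str.toList).foldl gi_step ([], 0, 0, 0)
  if st.1.any (fun r => r.1.isNone || r.2.1.isNone || r.2.2.isNone) then []
  else
    -- the branch guarantees every slot is filled; `.getD 0` extracts the present value
    st.1.map (fun r => (r.1.getD 0 - 2, r.2.1.getD 0 + 3, r.2.2.getD 0 + 1))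

-- ===== PRECONDITION & SPEC =====
def Spec_get_introns (annotation_str : String) (out : List (Int × Int × Int)) : Prop := out = get_introns_alt annotation_str
instance (annotation_str : String) (out : List (Int × Int × Int)) : Decidable (Spec_get_introns annotation_str out) := by unfold Spec_get_introns; infer_instance

-- ===== CLAIM (what is proved, stated in full; the proofs are below) =====
def Claim_equal_get_introns : Prop := ∀ (annotation_str : String), Dom_get_introns annotation_str → Spec_get_introns annotation_str (get_introns annotation_str)

-- ===== LEMMAS AND PROOFS =====

-- the three occurrence lists of a prefix, as a filterMap
def findF (l : List (Int × Char)) (ch : Char) : List Int :=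
  l.filterMap (fun p => if p.2 = ch then some p.1 else none)

-- the partial-triple table determined by the three occurrence lists
def zipAll (f b t : List Int) : List (Option Int × Option Int × Option Int) :=
  (List.range (max f.length (max b.length t.length))).map (fun k => (f[k]?, b[k]?, t[k]?))

theorem foldl_find_eq (l : List (Int × Char)) (ch : Char) : ∀ (acc : List Int),
    l.foldl (fun acc p => if p.2 = ch then acc ++ [p.1] else acc) acc = acc ++ findF l ch := by
  induction l with
  | nil => intro acc; simp [findF]
  | cons p l ih =>
    intro acc
    by_cases h : p.2 = ch <;> simp [findF, List.foldl_cons, h, ih]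

theorem foldl_append_map {α β : Type} (g : α → β) (l : List α) : ∀ (acc : List β),
    l.foldl (fun acc x => acc ++ [g x]) acc = acc ++ l.map g := by
  induction l with
  | nil => intro acc; simp
  | cons x l ih => intro acc; simp [List.foldl_cons, ih]

theorem length_zipAll (f b t : List Int) :
    (zipAll f b t).length = max f.length (max b.length t.length) := by
  simp [zipAll]

theorem getElem_zipAll (f b t : List Int) (k : Nat)
    (h : k < (zipAll f b t).length) :
    (zipAll f b t)[k] = (f[k]?, b[k]?, t[k]?) := by
  simp [zipAll]

theorem concat_getElem? (f : List Int) (i : Int) (k : Nat) :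
    (f ++ [i])[k]? = if k < f.length then f[k]? else if k = f.length then some i else none := by
  rw [List.getElem?_append]
  split_ifs with h1 h2
  · rfl
  · simp [h2]
  · rw [List.getElem?_eq_none_iff.mpr (by simp; omega)]

theorem fill5 (f b t : List Int) (i : Int) :
    ((if f.length = (zipAll f b t).length then zipAll f b t ++ [(none, none, none)]
      else zipAll f b t).modify f.length (fun r => (some i, r.2.1, r.2.2)))
    = zipAll (f ++ [i]) b t := by
  rw [length_zipAll]
  by_cases hc : f.length = max f.length (max b.length t.length)
  · rw [if_pos hc]
    apply List.ext_getElem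
    · simp only [List.length_modify, List.length_append, length_zipAll, List.length_cons,
        List.length_nil]
      omega
    · intro k h1 h2
      rw [List.getElem_modify]
      simp only [List.length_modify, List.length_append, length_zipAll, List.length_cons,
        List.length_nil] at h1
      simp only [length_zipAll, List.length_append, List.length_cons, List.length_nil] at h2
      by_cases hk : f.length = k
      · rw [if_pos hk]
        rw [List.getElem_append_right (by rw [length_zipAll]; omega)]
        simp only [length_zipAll, List.getElem_singleton]
        rw [getElem_zipAll]
        have hx : (f ++ [i])[k]? = some i := by
          rw [concat_getElem?, if_neg (by omega), if_pos hk.symm]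
        have hy : b[k]? = (none : Option Int) := List.getElem?_eq_none_iff.mpr (by omega)
        have hz : t[k]? = (none : Option Int) := List.getElem?_eq_none_iff.mpr (by omega)
        rw [hx, hy, hz]
      · rw [if_neg hk]
        rw [List.getElem_append_left (by rw [length_zipAll]; omega)]
        rw [getElem_zipAll, getElem_zipAll]
        have h2' : (f ++ [i])[k]? = f[k]? := by
          rw [concat_getElem?, if_pos (by omega)]
        rw [h2']
  · rw [if_neg hc]
    apply List.ext_getElem
    · simp only [List.length_modify, length_zipAll, List.length_append, List.length_cons,
        List.length_nil]
      omega
    · intro k h1 h2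
      rw [List.getElem_modify, getElem_zipAll]
      simp only [List.length_modify, length_zipAll] at h1
      by_cases hk : f.length = k
      · rw [if_pos hk, getElem_zipAll]
        have hx : (f ++ [i])[k]? = some i := by
          rw [concat_getElem?, if_neg (by omega), if_pos hk.symm]
        rw [hx]
      · rw [if_neg hk, getElem_zipAll]
        have h2' : (f ++ [i])[k]? = f[k]? := by
          rw [concat_getElem?]
          rcases Nat.lt_or_ge k f.length with h | h
          · rw [if_pos h]
          · rw [if_neg (by omega), if_neg (by omega), List.getElem?_eq_none_iff.mpr h]
        rw [h2']

theorem fillB (f b t : List Int) (i : Int) :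
    ((if b.length = (zipAll f b t).length then zipAll f b t ++ [(none, none, none)]
      else zipAll f b t).modify b.length (fun r => (r.1, some i, r.2.2)))
    = zipAll f (b ++ [i]) t := by
  rw [length_zipAll]
  by_cases hc : b.length = max f.length (max b.length t.length)
  · rw [if_pos hc]
    apply List.ext_getElem
    · simp only [List.length_modify, List.length_append, length_zipAll, List.length_cons,
        List.length_nil]
      omega
    · intro k h1 h2
      rw [List.getElem_modify]
      simp only [List.length_modify, List.length_append, length_zipAll, List.length_cons,
        List.length_nil] at h1
      simp only [length_zipAll, List.length_append, List.length_cons, List.length_nil] at h2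
      by_cases hk : b.length = k
      · rw [if_pos hk]
        rw [List.getElem_append_right (by rw [length_zipAll]; omega)]
        simp only [length_zipAll, List.getElem_singleton]
        rw [getElem_zipAll]
        have hx : (b ++ [i])[k]? = some i := by
          rw [concat_getElem?, if_neg (by omega), if_pos hk.symm]
        have hy : f[k]? = (none : Option Int) := List.getElem?_eq_none_iff.mpr (by omega)
        have hz : t[k]? = (none : Option Int) := List.getElem?_eq_none_iff.mpr (by omega)
        rw [hx, hy, hz]
      · rw [if_neg hk]
        rw [List.getElem_append_left (by rw [length_zipAll]; omega)]
        rw [getElem_zipAll, getElem_zipAll]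
        have h2' : (b ++ [i])[k]? = b[k]? := by
          rw [concat_getElem?, if_pos (by omega)]
        rw [h2']
  · rw [if_neg hc]
    apply List.ext_getElem
    · simp only [List.length_modify, length_zipAll, List.length_append, List.length_cons,
        List.length_nil]
      omega
    · intro k h1 h2
      rw [List.getElem_modify, getElem_zipAll]
      simp only [List.length_modify, length_zipAll] at h1
      by_cases hk : b.length = k
      · rw [if_pos hk, getElem_zipAll]
        have hx : (b ++ [i])[k]? = some i := by
          rw [concat_getElem?, if_neg (by omega), if_pos hk.symm]
        rw [hx]
      · rw [if_neg hk, getElem_zipAll]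
        have h2' : (b ++ [i])[k]? = b[k]? := by
          rw [concat_getElem?]
          rcases Nat.lt_or_ge k b.length with h | h
          · rw [if_pos h]
          · rw [if_neg (by omega), if_neg (by omega), List.getElem?_eq_none_iff.mpr h]
        rw [h2']

theorem fillT (f b t : List Int) (i : Int) :
    ((if t.length = (zipAll f b t).length then zipAll f b t ++ [(none, none, none)]
      else zipAll f b t).modify t.length (fun r => (r.1, r.2.1, some i)))
    = zipAll f b (t ++ [i]) := by
  rw [length_zipAll]
  by_cases hc : t.length = max f.length (max b.length t.length)
  · rw [if_pos hc]
    apply List.ext_getElem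
    · simp only [List.length_modify, List.length_append, length_zipAll, List.length_cons,
        List.length_nil]
      omega
    · intro k h1 h2
      rw [List.getElem_modify]
      simp only [List.length_modify, List.length_append, length_zipAll, List.length_cons,
        List.length_nil] at h1
      simp only [length_zipAll, List.length_append, List.length_cons, List.length_nil] at h2
      by_cases hk : t.length = k
      · rw [if_pos hk]
        rw [List.getElem_append_right (by rw [length_zipAll]; omega)]
        simp only [length_zipAll, List.getElem_singleton]
        rw [getElem_zipAll]
        have hx : (t ++ [i])[k]? = some i := by
          rw [concat_getElem?, if_neg (by omega), if_pos hk.symm]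
        have hy : f[k]? = (none : Option Int) := List.getElem?_eq_none_iff.mpr (by omega)
        have hz : b[k]? = (none : Option Int) := List.getElem?_eq_none_iff.mpr (by omega)
        rw [hx, hy, hz]
      · rw [if_neg hk]
        rw [List.getElem_append_left (by rw [length_zipAll]; omega)]
        rw [getElem_zipAll, getElem_zipAll]
        have h2' : (t ++ [i])[k]? = t[k]? := by
          rw [concat_getElem?, if_pos (by omega)]
        rw [h2']
  · rw [if_neg hc]
    apply List.ext_getElem
    · simp only [List.length_modify, length_zipAll, List.length_append, List.length_cons,
        List.length_nil]
      omega
    · intro k h1 h2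
      rw [List.getElem_modify, getElem_zipAll]
      simp only [List.length_modify, length_zipAll] at h1
      by_cases hk : t.length = k
      · rw [if_pos hk, getElem_zipAll]
        have hx : (t ++ [i])[k]? = some i := by
          rw [concat_getElem?, if_neg (by omega), if_pos hk.symm]
        rw [hx]
      · rw [if_neg hk, getElem_zipAll]
        have h2' : (t ++ [i])[k]? = t[k]? := by
          rw [concat_getElem?]
          rcases Nat.lt_or_ge k t.length with h | h
          · rw [if_pos h]
          · rw [if_neg (by omega), if_neg (by omega), List.getElem?_eq_none_iff.mpr h]
        rw [h2']

theorem gi_invariant (l : List (Int × Char)) : ∀ (f b t : List Int),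
    l.foldl gi_step (zipAll f b t, f.length, b.length, t.length)
    = (zipAll (f ++ findF l '5') (b ++ findF l 'B') (t ++ findF l '3'),
       (f ++ findF l '5').length, (b ++ findF l 'B').length, (t ++ findF l '3').length) := by
  induction l with
  | nil => intro f b t; simp [findF]
  | cons p l ih =>
    intro f b t
    by_cases h5 : p.2 = '5'
    · have hstep : gi_step (zipAll f b t, f.length, b.length, t.length) p
          = (zipAll (f ++ [p.1]) b t, (f ++ [p.1]).length, b.length, t.length) := by
        simp only [gi_step, if_pos h5, fill5]
        simp
      rw [List.foldl_cons, hstep, ih]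
      simp [findF, h5, List.append_assoc]
    · by_cases hB : p.2 = 'B'
      · have hstep : gi_step (zipAll f b t, f.length, b.length, t.length) p
            = (zipAll f (b ++ [p.1]) t, f.length, (b ++ [p.1]).length, t.length) := by
          simp only [gi_step, if_neg h5, if_pos hB, fillB]
          simp
        rw [List.foldl_cons, hstep, ih]
        simp [findF, hB, List.append_assoc]
      · by_cases h3 : p.2 = '3'
        · have hstep : gi_step (zipAll f b t, f.length, b.length, t.length) p
              = (zipAll f b (t ++ [p.1]), f.length, b.length, (t ++ [p.1]).length) := by
            simp only [gi_step, if_neg h5, if_neg hB, if_pos h3, fillT]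
            simp
          rw [List.foldl_cons, hstep, ih]
          simp [findF, h3, List.append_assoc]
        · rw [List.foldl_cons]
          simp only [gi_step, if_neg h5, if_neg hB, if_neg h3]
          rw [ih]
          simp [findF, h5, hB, h3]

theorem any_none_iff (f b t : List Int) :
    ((zipAll f b t).any (fun r => r.1.isNone || r.2.1.isNone || r.2.2.isNone) = true)
    ↔ ¬(f.length = b.length ∧ f.length = t.length) := by
  simp only [zipAll, List.any_map, List.any_eq_true, List.mem_range, Function.comp,
    Bool.or_eq_true, Option.isNone_iff_eq_none, List.getElem?_eq_none_iff]
  constructor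
  · rintro ⟨k, hk, h⟩; omega
  · intro h
    exact ⟨min f.length (min b.length t.length), by omega, by omega⟩

theorem map_extract (f b t : List Int) :
    (zipAll f b t).map (fun r => (r.1.getD 0 - 2, r.2.1.getD 0 + 3, r.2.2.getD 0 + 1))
    = (List.range (max f.length (max b.length t.length))).map
        (fun k => (f.getD k 0 - 2, b.getD k 0 + 3, t.getD k 0 + 1)) := by
  simp [zipAll, List.map_map, Function.comp, List.getD_eq_getElem?_getD]

-- ===== VERDICT (by name: the statement is the Claim_ definition above) =====
theorem get_introns_spec : Claim_equal_get_introns := by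
  intro s _
  unfold Spec_get_introns get_introns get_introns_alt pyFind
  have hinv := gi_invariant (PySem.List.enumerate s.toList) [] [] []
  simp only [List.nil_append] at hinv
  have hz : zipAll [] [] [] = [] := by simp [zipAll]
  rw [hz] at hinv
  simp only [List.length_nil] at hinv
  rw [hinv]
  simp only [foldl_find_eq, List.nil_append]
  by_cases hlen : (findF (PySem.List.enumerate s.toList) '5').length
      = (findF (PySem.List.enumerate s.toList) 'B').length
    ∧ (findF (PySem.List.enumerate s.toList) '5').length
      = (findF (PySem.List.enumerate s.toList) '3').length
  · rw [if_pos hlen]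
    rw [if_neg (by rw [any_none_iff]; exact not_not.mpr hlen)]
    rw [foldl_append_map, List.nil_append, map_extract]
    have hM : max (findF (PySem.List.enumerate s.toList) '5').length
        (max (findF (PySem.List.enumerate s.toList) 'B').length
          (findF (PySem.List.enumerate s.toList) '3').length)
        = (findF (PySem.List.enumerate s.toList) '5').length := by omega
    rw [hM]
  · rw [if_neg hlen, if_pos ((any_none_iff _ _ _).mpr hlen)]
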